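-- pv_equiv track=rewrite | github.com/klebgenomics/Kleborate | kleborate/modules/escherichia__stxtyper/escherichia__stxtyper.py | parse_stxtyper_output
-- ===== SOURCE A (Python) =====
-- def parse_stxtyper_output(output, headers, all_headers):
--     """
--     Parse STXTyper output and concatenate values for each selected column.
--     Returns a dict mapping each header to a semicolon-separated string.
--     """
--     lines = [line.strip() for line in output.strip().split('\n') if line.strip() and not line.startswith('#')]
--     if not lines:
--         return {header: '' for header in headers}
--
--     # Split each line into columns
--     rows = [line.split('\t') for line in lines]
--
--     # Ensure that all rows have the correct number of columns
--     expected_col_count = len(all_headers)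
--     filtered_rows = [row for row in rows if len(row) >= expected_col_count]
--     if not filtered_rows:
--         return {header: '' for header in headers}
--
--     # Create a mapping of header to column index
--     header_to_index = {header: idx for idx, header in enumerate(all_headers)}
--
--     result_dict = {}
--     for header in headers:
--         idx = header_to_index.get(header)
--         if idx is not None:
--             # Collect the relevant column from each row, join with ;
--             values = [row[idx] for row in filtered_rows]
--             result_dict[header] = ';'.join(values)
--         else:
--             result_dict[header] = ''
--     return result_dict
-- ===== SOURCE B (Python) =====
-- def parse_stxtyper_output(output, headers, all_headers):
--     """
--     Parse STXTyper output and concatenate values for each selected column.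
--     Single streaming pass over the rows: per requested header we grow a
--     partial ';'-joined string as each row arrives, instead of collecting
--     whole columns and joining them afterwards.
--     """
--     index_of = {h: i for i, h in enumerate(all_headers)}
--     selected = {h: index_of[h] for h in headers if h in index_of}
--     acc = {h: None for h in selected}
--     for raw in output.strip().split('\n'):
--         if not raw.strip() or raw.startswith('#'):
--             continue
--         row = raw.strip().split('\t')
--         if len(row) < len(all_headers):
--             continue
--         for h, i in selected.items():
--             v = row[i]
--             acc[h] = v if acc[h] is None else acc[h] + ';' + v
--     return {h: (acc[h] if acc.get(h) is not None else '') for h in headers}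
-- ===== Notes on version B (the rewrite author's own statement) =====
-- stated objective: alternative
-- what changed: A stages the work (collect all lines, filter rows, then for each requested header gather that whole column as a list and ';'.join it); B makes one streaming pass over the raw lines, skipping comment/short rows inline and growing a partial ';'-joined string per requested header as each row arrives, so no column lists are ever materialised and no join pass runs at the end.
import Mathlib
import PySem

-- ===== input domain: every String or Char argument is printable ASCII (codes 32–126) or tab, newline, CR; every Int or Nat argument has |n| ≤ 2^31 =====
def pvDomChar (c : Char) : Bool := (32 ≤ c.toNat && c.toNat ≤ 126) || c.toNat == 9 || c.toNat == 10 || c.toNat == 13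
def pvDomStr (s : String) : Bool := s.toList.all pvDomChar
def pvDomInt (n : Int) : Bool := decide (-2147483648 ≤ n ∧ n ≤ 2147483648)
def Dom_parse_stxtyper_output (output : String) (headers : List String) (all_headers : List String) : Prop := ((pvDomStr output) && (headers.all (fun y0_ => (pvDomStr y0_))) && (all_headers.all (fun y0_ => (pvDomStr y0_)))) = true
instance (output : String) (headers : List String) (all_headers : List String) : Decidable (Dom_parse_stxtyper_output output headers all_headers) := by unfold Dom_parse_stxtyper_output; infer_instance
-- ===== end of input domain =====

-- B replaces A's staged collect-columns-then-join scheme by one streaming pass over the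
-- raw lines that grows a partial ';'-joined string per requested header (alternative
-- decomposition, same return value).

-- ===== PORT A =====
def parse_stxtyper_output (output : String) (headers : List String) (all_headers : List String) : List (String × String) :=
  let lines := (((PySem.Str.split? (PySem.Str.strip output) "\n").getD []).filter
      (fun line => (PySem.Str.strip line != "") && !PySem.Str.startswith line "#")).map PySem.Str.strip
  if lines = [] then
    (headers.foldl (fun d h => d.insert h "") PySem.Dict.empty).items
  else
    let rows := lines.map (fun line => (PySem.Str.split? line "\t").getD [])
    let expected_col_count := all_headers.length
    let filtered_rows := rows.filter (fun row => decide (expected_col_count ≤ row.length))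
    if filtered_rows = [] then
      (headers.foldl (fun d h => d.insert h "") PySem.Dict.empty).items
    else
      let header_to_index := (PySem.List.enumerate all_headers 0).foldl
        (fun d p => d.insert p.2 p.1) (PySem.Dict.empty : PySem.Dict String Int)
      (headers.foldl (fun d h =>
        match header_to_index.get? h with
        | some idx =>
            d.insert h (PySem.Str.join ";" ((filtered_rows.map (fun row => (PySem.List.pyGet? row idx).getD ""))))
        | none => d.insert h "") PySem.Dict.empty).items

-- ===== PORT B =====
-- acc[h] update: `v if acc[h] is None else acc[h] + ';' + v`, always stored back (some)
def pvPush (o : Option String) (v : String) : Option String :=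
  some (match o with | none => v | some s => s ++ ";" ++ v)

-- row[i]; in B the index is always in range (0 ≤ i < len(all_headers) ≤ len(row))
def pvVal (row : List String) (i : Int) : String := (PySem.List.pyGet? row i).getD ""

def parse_stxtyper_output_alt (output : String) (headers : List String) (all_headers : List String) : List (String × String) :=
  let index_of := (PySem.List.enumerate all_headers 0).foldl
      (fun d p => d.insert p.2 p.1) (PySem.Dict.empty : PySem.Dict String Int)
  let selected := headers.foldl (fun d h =>
      match index_of.get? h with
      | some i => d.insert h i
      | none => d) (PySem.Dict.empty : PySem.Dict String Int)
  let acc0 := selected.keys.foldl (fun d h => d.insert h (none : Option String)) PySem.Dict.empty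
  let lines := (PySem.Str.split? (PySem.Str.strip output) "\n").getD []
  let acc := lines.foldl (fun acc raw =>
      if (PySem.Str.strip raw == "") || PySem.Str.startswith raw "#" then acc
      else
        let row := (PySem.Str.split? (PySem.Str.strip raw) "\t").getD []
        if row.length < all_headers.length then acc
        else selected.items.foldl (fun acc p =>
          acc.insert p.1 (pvPush (acc.get? p.1).join (pvVal row p.2))) acc) acc0
  (headers.foldl (fun d h =>
      d.insert h (match (acc.get? h).join with | some s => s | none => "")) PySem.Dict.empty).items

-- ===== PRECONDITION & SPEC =====
def Spec_parse_stxtyper_output (output : String) (headers : List String) (all_headers : List String) (out : List (String × String)) : Prop := out = parse_stxtyper_output_alt output headers all_headers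
instance (output : String) (headers : List String) (all_headers : List String) (out : List (String × String)) : Decidable (Spec_parse_stxtyper_output output headers all_headers out) := by unfold Spec_parse_stxtyper_output; infer_instance

-- ===== CLAIM (what is proved, stated in full; the proofs are below) =====
def Claim_equal_parse_stxtyper_output : Prop := ∀ (output : String) (headers : List String) (all_headers : List String), Dom_parse_stxtyper_output output headers all_headers → Spec_parse_stxtyper_output output headers all_headers (parse_stxtyper_output output headers all_headers)

-- ===== LEMMAS AND PROOFS =====

-- the filtered rows both programs effectively process
def pvRows (L : Nat) (lines : List String) : List (List String) :=
  ((lines.filter (fun line => (PySem.Str.strip line != "") && !PySem.Str.startswith line "#")).map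
      (fun l => (PySem.Str.split? (PySem.Str.strip l) "\t").getD [])).filter
    (fun r => decide (L ≤ r.length))

lemma pv_join_cons2 (x y : String) (L : List String) :
    PySem.Str.join ";" (x :: y :: L) = x ++ ";" ++ PySem.Str.join ";" (y :: L) := by
  simp only [PySem.Str.join, PySem.Chars.join, List.intercalate, List.map_cons,
    List.intersperse, List.flatten_cons]
  rw [String.ofList_append, String.ofList_append, String.ofList_toList, String.ofList_toList,
    ← String.append_assoc]

lemma pv_join_singleton (x : String) : PySem.Str.join ";" [x] = x := by
  simp [PySem.Str.join, PySem.Chars.join, List.intercalate, String.ofList_toList]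

lemma pv_join_foldl (l : List String) (a : String) :
    PySem.Str.join ";" (a :: l) = l.foldl (fun acc v => acc ++ ";" ++ v) a := by
  induction l generalizing a with
  | nil => exact pv_join_singleton a
  | cons b t ih =>
    have h2 : PySem.Str.join ";" (a :: b :: t) = PySem.Str.join ";" ((a ++ ";" ++ b) :: t) := by
      cases t with
      | nil => rw [pv_join_cons2, pv_join_singleton, pv_join_singleton]
      | cons c t' =>
        rw [pv_join_cons2, pv_join_cons2, pv_join_cons2]
        simp [String.append_assoc]
    rw [h2, ih, List.foldl_cons]

lemma pv_stream_some (l : List String) (s : String) :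
    l.foldl pvPush (some s) = some (l.foldl (fun acc v => acc ++ ";" ++ v) s) := by
  induction l generalizing s with
  | nil => rfl
  | cons v t ih => simpa [pvPush] using ih (s ++ ";" ++ v)

lemma pv_stream_join (l : List String) :
    l.foldl pvPush none = if l = [] then none else some (PySem.Str.join ";" l) := by
  cases l with
  | nil => rfl
  | cons a t =>
    have : pvPush none a = some a := rfl
    simp only [List.foldl_cons, this, pv_stream_some, pv_join_foldl]
    simp

lemma pv_lift (l : List (List String)) (i : Int) (w : Option String) :
    l.foldl (fun (o : Option (Option String)) row => some (pvPush o.join (pvVal row i))) (some w)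
      = some (l.foldl (fun o row => pvPush o (pvVal row i)) w) := by
  induction l generalizing w with
  | nil => rfl
  | cons r t ih => simpa using ih (pvPush w (pvVal r i))

lemma pv_inner (sel : List (String × Int)) (row : List String)
    (hnd : (sel.map Prod.fst).Nodup) (acc : PySem.Dict String (Option String)) (h : String) :
    (sel.foldl (fun acc p => acc.insert p.1 (pvPush (acc.get? p.1).join (pvVal row p.2))) acc).get? h
      = match sel.find? (fun p => p.1 == h) with
        | some p => some (pvPush (acc.get? h).join (pvVal row p.2))
        | none => acc.get? h := by
  induction sel generalizing acc with
  | nil => rfl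
  | cons a t ih =>
    simp only [List.map_cons, List.nodup_cons] at hnd
    by_cases hha : a.1 = h
    · have hfind : (a :: t).find? (fun p => p.1 == h) = some a := by
        simp [hha]
      have hnot : t.find? (fun p => p.1 == h) = none := by
        rw [List.find?_eq_none]
        intro p hp
        simp only [beq_iff_eq]
        intro hc
        have hm : p.1 ∈ t.map Prod.fst := List.mem_map_of_mem hp
        rw [hc, ← hha] at hm
        exact hnd.1 hm
      rw [List.foldl_cons, ih hnd.2, hnot, hfind]
      simp [hha, PySem.Dict.get?_insert_self]
    · have hfind : (a :: t).find? (fun p => p.1 == h) = t.find? (fun p => p.1 == h) := by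
        simp [hha]
      rw [List.foldl_cons, ih hnd.2, hfind,
        PySem.Dict.get?_insert_of_ne _ _ (fun hc => hha hc.symm)]

lemma pv_outer (sel : List (String × Int)) (hnd : (sel.map Prod.fst).Nodup)
    (rs : List (List String)) (acc : PySem.Dict String (Option String)) (h : String) :
    (rs.foldl (fun acc row =>
        sel.foldl (fun acc p => acc.insert p.1 (pvPush (acc.get? p.1).join (pvVal row p.2))) acc) acc).get? h
      = match sel.find? (fun p => p.1 == h) with
        | some p => rs.foldl (fun (o : Option (Option String)) row => some (pvPush o.join (pvVal row p.2))) (acc.get? h)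
        | none => acc.get? h := by
  induction rs generalizing acc with
  | nil => cases sel.find? (fun p => p.1 == h) <;> rfl
  | cons r t ih =>
    rw [List.foldl_cons, ih]
    cases hf : sel.find? (fun p => p.1 == h) with
    | none => simp [pv_inner sel r hnd acc h, hf]
    | some p => simp [pv_inner sel r hnd acc h, hf]

lemma pv_skip (L : Nat) (g : PySem.Dict String (Option String) → List String → PySem.Dict String (Option String))
    (lines : List String) (acc : PySem.Dict String (Option String)) :
    lines.foldl (fun acc raw =>
        if (PySem.Str.strip raw == "") || PySem.Str.startswith raw "#" then acc
        else if ((PySem.Str.split? (PySem.Str.strip raw) "\t").getD []).length < L then acc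
        else g acc ((PySem.Str.split? (PySem.Str.strip raw) "\t").getD [])) acc
      = (pvRows L lines).foldl g acc := by
  induction lines generalizing acc with
  | nil => rfl
  | cons raw t ih =>
    have hp : ((PySem.Str.strip raw != "") && !PySem.Str.startswith raw "#")
        = !((PySem.Str.strip raw == "") || PySem.Str.startswith raw "#") := by
      cases h1 : PySem.Str.strip raw == "" <;> cases h2 : PySem.Str.startswith raw "#" <;>
        simp [bne, h1]
    rw [List.foldl_cons]
    cases hc : ((PySem.Str.strip raw == "") || PySem.Str.startswith raw "#") with
    | true =>
      have hnp : ((PySem.Str.strip raw != "") && !PySem.Str.startswith raw "#") = false := by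
        rw [hp, hc]; rfl
      have hdrop : pvRows L (raw :: t) = pvRows L t := by
        simp only [pvRows, List.filter_cons]
        rw [hnp]
        simp
      rw [if_pos rfl, hdrop]
      exact ih acc
    | false =>
      have hyp : ((PySem.Str.strip raw != "") && !PySem.Str.startswith raw "#") = true := by
        rw [hp, hc]; rfl
      rw [if_neg (by simp)]
      by_cases hlen : ((PySem.Str.split? (PySem.Str.strip raw) "\t").getD []).length < L
      · have hnle : ¬ L ≤ ((PySem.Str.split? (PySem.Str.strip raw) "\t").getD []).length := by omega
        have hkeep : pvRows L (raw :: t) = pvRows L t := by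
          simp only [pvRows, List.filter_cons]
          rw [hyp]
          simp [hnle]
        rw [if_pos hlen, hkeep]
        exact ih acc
      · have hle : L ≤ ((PySem.Str.split? (PySem.Str.strip raw) "\t").getD []).length := by omega
        have hkeep : pvRows L (raw :: t)
            = ((PySem.Str.split? (PySem.Str.strip raw) "\t").getD []) :: pvRows L t := by
          simp only [pvRows, List.filter_cons]
          rw [hyp]
          simp [hle]
        rw [if_neg hlen, hkeep, List.foldl_cons]
        exact ih _

lemma pv_sel_get_not_mem (idx : PySem.Dict String Int) (hs : List String)
    (d : PySem.Dict String Int) (h : String) (hmem : h ∉ hs) :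
    (hs.foldl (fun d h => match idx.get? h with | some i => d.insert h i | none => d) d).get? h
      = d.get? h := by
  induction hs generalizing d with
  | nil => rfl
  | cons a t ih =>
    simp only [List.mem_cons, not_or] at hmem
    rw [List.foldl_cons, ih _ hmem.2]
    cases hi : idx.get? a with
    | none => rfl
    | some i => exact PySem.Dict.get?_insert_of_ne _ _ hmem.1

lemma pv_sel_get (idx : PySem.Dict String Int) (hs : List String)
    (d : PySem.Dict String Int) (h : String) (hmem : h ∈ hs) :
    (hs.foldl (fun d h => match idx.get? h with | some i => d.insert h i | none => d) d).get? h
      = match idx.get? h with | some i => some i | none => d.get? h := by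
  induction hs generalizing d with
  | nil => exact absurd hmem (List.not_mem_nil)
  | cons a t ih =>
    rw [List.foldl_cons]
    by_cases hmt : h ∈ t
    · rw [ih _ hmt]
      cases hi : idx.get? h with
      | some i => rfl
      | none =>
        cases hia : idx.get? a with
        | none => rfl
        | some j =>
          by_cases hha : h = a
          · rw [hha] at hi; rw [hi] at hia; cases hia
          · exact PySem.Dict.get?_insert_of_ne _ _ hha
    · have hha : h = a := by
        rcases List.mem_cons.mp hmem with h' | h'
        · exact h'
        · exact absurd h' hmt
      subst hha
      rw [pv_sel_get_not_mem idx t _ h hmt]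
      cases hi : idx.get? h with
      | none => rfl
      | some i => simp [PySem.Dict.get?_insert_self]

lemma pv_sel_nodup (idx : PySem.Dict String Int) (hs : List String)
    (d : PySem.Dict String Int) (hnd : d.keys.Nodup) :
    (hs.foldl (fun d h => match idx.get? h with | some i => d.insert h i | none => d) d).keys.Nodup := by
  induction hs generalizing d with
  | nil => exact hnd
  | cons a t ih =>
    rw [List.foldl_cons]
    cases hi : idx.get? a with
    | none => exact ih _ hnd
    | some i => exact ih _ (PySem.Dict.nodup_keys_insert _ _ _ hnd)

lemma pv_acc0_get (ks : List String) (d : PySem.Dict String (Option String)) (h : String) :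
    (ks.foldl (fun d h => d.insert h (none : Option String)) d).get? h
      = if h ∈ ks then some none else d.get? h := by
  induction ks generalizing d with
  | nil => simp
  | cons a t ih =>
    rw [List.foldl_cons, ih]
    by_cases hmt : h ∈ t
    · simp [hmt]
    · by_cases hha : h = a
      · subst hha; simp [hmt, PySem.Dict.get?_insert_self]
      · simp [hmt, hha, PySem.Dict.get?_insert_of_ne _ _ hha]

-- ===== VERDICT (by name: the statement is the Claim_ definition above) =====
theorem parse_stxtyper_output_spec : Claim_equal_parse_stxtyper_output := by
  intro output headers all_headers _
  unfold Spec_parse_stxtyper_output parse_stxtyper_output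
  set L := all_headers.length with hL
  set lines0 := (PySem.Str.split? (PySem.Str.strip output) "\n").getD [] with hlines0
  set idx := (PySem.List.enumerate all_headers 0).foldl
      (fun d p => d.insert p.2 p.1) (PySem.Dict.empty : PySem.Dict String Int) with hidx
  set selected := headers.foldl (fun d h =>
      match idx.get? h with
      | some i => d.insert h i
      | none => d) (PySem.Dict.empty : PySem.Dict String Int) with hsel
  set rs := pvRows L lines0 with hrs
  -- the value A assigns to header h in its main branch (also "" in both empty branches)
  set Aval : String → String := fun h =>
    match idx.get? h with
    | some i => PySem.Str.join ";" (rs.map (fun row => (PySem.List.pyGet? row i).getD ""))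
    | none => "" with hAval
  clear_value L lines0 idx selected rs Aval
  have hndkeys : selected.keys.Nodup := by
    rw [hsel]
    exact pv_sel_nodup idx headers PySem.Dict.empty (by simp [PySem.Dict.keys_empty])
  have hndsel : (selected.items.map Prod.fst).Nodup := by
    simpa [PySem.Dict.keys] using hndkeys
  -- B's accumulator after the streaming pass, read at h ∈ headers
  have hBval : ∀ h, h ∈ headers →
      (match (((lines0.foldl (fun acc raw =>
          if (PySem.Str.strip raw == "") || PySem.Str.startswith raw "#" then acc
          else if ((PySem.Str.split? (PySem.Str.strip raw) "\t").getD []).length < L then acc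
          else selected.items.foldl (fun acc p =>
            acc.insert p.1 (pvPush (acc.get? p.1).join
              (pvVal ((PySem.Str.split? (PySem.Str.strip raw) "\t").getD []) p.2))) acc)
          (selected.keys.foldl (fun d h => d.insert h (none : Option String)) PySem.Dict.empty))).get? h).join with
        | some s => s
        | none => "") = Aval h := by
    intro h hmem
    rw [show (lines0.foldl (fun acc raw =>
          if (PySem.Str.strip raw == "") || PySem.Str.startswith raw "#" then acc
          else if ((PySem.Str.split? (PySem.Str.strip raw) "\t").getD []).length < L then acc
          else selected.items.foldl (fun acc p =>
            acc.insert p.1 (pvPush (acc.get? p.1).join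
              (pvVal ((PySem.Str.split? (PySem.Str.strip raw) "\t").getD []) p.2))) acc)
          (selected.keys.foldl (fun d h => d.insert h (none : Option String)) PySem.Dict.empty))
        = (pvRows L lines0).foldl (fun acc row => selected.items.foldl (fun acc p =>
            acc.insert p.1 (pvPush (acc.get? p.1).join (pvVal row p.2))) acc)
          (selected.keys.foldl (fun d h => d.insert h (none : Option String)) PySem.Dict.empty)
      from pv_skip L (fun acc row => selected.items.foldl (fun acc p =>
            acc.insert p.1 (pvPush (acc.get? p.1).join (pvVal row p.2))) acc) lines0
          (selected.keys.foldl (fun d h => d.insert h (none : Option String)) PySem.Dict.empty), ← hrs,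
      pv_outer selected.items hndsel rs _ h]
    cases hf : selected.items.find? (fun p => p.1 == h) with
    | none =>
      have hgsel : selected.get? h = none := by
        simp [PySem.Dict.get?, hf]
      have hidxh : idx.get? h = none := by
        have := pv_sel_get idx headers PySem.Dict.empty h hmem
        rw [← hsel] at this
        cases hi : idx.get? h with
        | none => rfl
        | some i => rw [hi] at this; rw [this] at hgsel; cases hgsel
      have hnk : h ∉ selected.keys := by
        exact (PySem.Dict.get?_eq_none_iff_not_mem_keys _ _).mp hgsel
      rw [pv_acc0_get selected.keys PySem.Dict.empty h, if_neg hnk]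
      simp [hAval, hidxh, PySem.Dict.get?_empty]
    | some p =>
      have hgsel : selected.get? h = some p.2 := by
        simp [PySem.Dict.get?, hf]
      have hidxh : idx.get? h = some p.2 := by
        have := pv_sel_get idx headers PySem.Dict.empty h hmem
        rw [← hsel] at this
        cases hi : idx.get? h with
        | none =>
          rw [hi] at this; rw [this] at hgsel; simp [PySem.Dict.get?_empty] at hgsel
        | some i =>
          rw [hi] at this; rw [this] at hgsel
          cases hgsel; rfl
      have hmk : h ∈ selected.keys := by
        by_contra hnk
        rw [(PySem.Dict.get?_eq_none_iff_not_mem_keys _ _).mpr hnk] at hgsel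
        cases hgsel
      rw [pv_acc0_get selected.keys PySem.Dict.empty h, if_pos hmk]
      dsimp only
      rw [pv_lift rs p.2 none]
      have hmapf : rs.foldl (fun o row => pvPush o (pvVal row p.2)) none
          = (rs.map (fun row => pvVal row p.2)).foldl pvPush none := by
        rw [List.foldl_map]
      rw [hmapf, pv_stream_join]
      by_cases hre : rs = []
      · simp [hre, hAval, hidxh, PySem.Str.join, PySem.Chars.join, List.intercalate]
      · have hmne : rs.map (fun row => pvVal row p.2) ≠ [] := by
          simpa using hre
        simp only [List.map_eq_nil_iff, hre, Option.join_some]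
        simp [hAval, hidxh, pvVal]
  -- B's result equals headers folded with Aval
  have hB : parse_stxtyper_output_alt output headers all_headers
      = (headers.foldl (fun d h => d.insert h (Aval h)) PySem.Dict.empty).items := by
    unfold parse_stxtyper_output_alt
    dsimp only
    rw [← hidx, ← hsel, ← hlines0, ← hL]
    congr 1
    exact PySem.List.foldl_congr_mem headers _ _ _ (fun d h hm => congrArg _ (hBval h hm))
  rw [hB]
  -- now each of A's branches equals the same fold
  by_cases hl : (lines0.filter
      (fun line => (PySem.Str.strip line != "") && !PySem.Str.startswith line "#")).map PySem.Str.strip = []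
  · rw [if_pos hl]
    have hrse : rs = [] := by
      have hfe : lines0.filter (fun line => (PySem.Str.strip line != "") && !PySem.Str.startswith line "#") = [] := by
        simpa using hl
      rw [hrs]
      unfold pvRows
      rw [hfe]
      rfl
    congr 1
    refine PySem.List.foldl_congr_mem headers _ _ _ (fun d h _ => ?_)
    have : Aval h = "" := by
      cases hi : idx.get? h with
      | none => simp [hAval, hi]
      | some i => simp [hAval, hi, hrse, PySem.Str.join, PySem.Chars.join, List.intercalate]
    rw [this]
  · rw [if_neg hl]
    dsimp only
    have hfr : (((lines0.filter
        (fun line => (PySem.Str.strip line != "") && !PySem.Str.startswith line "#")).map PySem.Str.strip).map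
          (fun line => (PySem.Str.split? line "\t").getD [])).filter
        (fun row => decide (L ≤ row.length)) = rs := by
      rw [List.map_map, hrs]
      unfold pvRows
      simp only [Function.comp_def]
    rw [hfr]
    by_cases hre : rs = []
    · rw [if_pos hre]
      congr 1
      refine PySem.List.foldl_congr_mem headers _ _ _ (fun d h _ => ?_)
      have : Aval h = "" := by
        cases hi : idx.get? h with
        | none => simp [hAval, hi]
        | some i => simp [hAval, hi, hre, PySem.Str.join, PySem.Chars.join, List.intercalate]
      rw [this]
    · rw [if_neg hre]
      congr 1
      refine PySem.List.foldl_congr_mem headers _ _ _ (fun d h _ => ?_)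
      cases hi : idx.get? h with
      | none => simp [hAval, hi]
      | some i => simp [hAval, hi]
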